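-- pv_equiv track=rewrite | github.com/belsarmi/AdventOfCode2019 | Day1/python/AoC_Day1Solution2.py | calculate
-- ===== SOURCE A (Python) =====
-- def calc_result(module):
--     return module // 3 - 2
--
-- def calculate (modules):
--     mysum = 0
--     i_res = False
--     res2 = 0
--     for module in modules:
--         res = calc_result(module)
--         mysum += res
--         while not i_res:
--             if calc_result(res) >= 0:
--                 res = calc_result(res)
--                 mysum += res
--             else:
--                 i_res = True
--         i_res = False
--     return mysum
-- ===== SOURCE B (Python) =====
-- def fuel_chain(r):
--     nxt = r // 3 - 2
--     return nxt + fuel_chain(nxt) if nxt >= 0 else 0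
--
-- def calculate(modules):
--     return sum((m // 3 - 2) + fuel_chain(m // 3 - 2) for m in modules)
-- ===== Notes on version B (the rewrite author's own statement) =====
-- stated objective: simpler
-- what changed: Replaces the imperative while-loop-with-flag and running accumulator by a recursive fuel_chain helper over the geometric fuel chain, summed per module with a generator expression.
import Mathlib
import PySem

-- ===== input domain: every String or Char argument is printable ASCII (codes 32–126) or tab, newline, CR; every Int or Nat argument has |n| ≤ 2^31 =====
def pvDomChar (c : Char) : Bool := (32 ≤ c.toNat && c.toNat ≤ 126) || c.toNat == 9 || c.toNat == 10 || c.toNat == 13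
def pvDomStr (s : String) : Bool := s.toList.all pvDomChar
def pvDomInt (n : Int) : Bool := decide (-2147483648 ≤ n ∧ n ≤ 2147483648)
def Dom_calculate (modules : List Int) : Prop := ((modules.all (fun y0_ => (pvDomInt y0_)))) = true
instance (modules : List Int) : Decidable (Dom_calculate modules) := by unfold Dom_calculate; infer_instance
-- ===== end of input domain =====

-- B replaces A's while-loop-with-flag accumulator by a recursive fuel_chain helper summed per module (objective: simpler).

-- ===== PORT A =====
def calc_result (module : Int) : Int := PySem.Int.floordiv module 3 - 2

-- A's inner 'while not i_res' loop: state is (res, mysum); the flag just exits the loop.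
def calcLoop (res mysum : Int) : Int :=
  if calc_result res ≥ 0 then
    calcLoop (calc_result res) (mysum + calc_result res)
  else
    mysum
termination_by res.toNat
decreasing_by
  simp only [calc_result, PySem.Int.floordiv_eq_ediv_of_pos (by omega : (0:Int) < 3)] at *
  omega

def calculate (modules : List Int) : Int :=
  modules.foldl (fun mysum module =>
    let res := calc_result module
    calcLoop res (mysum + res)) 0

-- ===== PORT B =====
def fuel_chain (r : Int) : Int :=
  if PySem.Int.floordiv r 3 - 2 ≥ 0 then
    (PySem.Int.floordiv r 3 - 2) + fuel_chain (PySem.Int.floordiv r 3 - 2)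
  else 0
termination_by r.toNat
decreasing_by
  simp only [PySem.Int.floordiv_eq_ediv_of_pos (by omega : (0:Int) < 3)] at *
  omega

def calculate_alt (modules : List Int) : Int :=
  (modules.map (fun m =>
    (PySem.Int.floordiv m 3 - 2) + fuel_chain (PySem.Int.floordiv m 3 - 2))).sum

-- ===== PRECONDITION & SPEC =====
def Spec_calculate (modules : List Int) (out : Int) : Prop := out = calculate_alt modules
instance (modules : List Int) (out : Int) : Decidable (Spec_calculate modules out) := by unfold Spec_calculate; infer_instance

-- ===== CLAIM (what is proved, stated in full; the proofs are below) =====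
def Claim_equal_calculate : Prop := ∀ (modules : List Int), Dom_calculate modules → Spec_calculate modules (calculate modules)

-- ===== LEMMAS AND PROOFS =====
theorem calcLoop_eq (res mysum : Int) : calcLoop res mysum = mysum + fuel_chain res := by
  induction res, mysum using calcLoop.induct with
  | case1 res mysum h ih =>
      rw [calcLoop, fuel_chain]
      simp only [calc_result] at *
      rw [if_pos h, if_pos h, ih]
      ring
  | case2 res mysum h =>
      rw [calcLoop, fuel_chain]
      simp only [calc_result] at *
      rw [if_neg h, if_neg h]
      ring

theorem calculate_foldl (modules : List Int) (acc : Int) :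
    modules.foldl (fun mysum module =>
      let res := calc_result module
      calcLoop res (mysum + res)) acc
    = acc + (modules.map (fun m =>
        (PySem.Int.floordiv m 3 - 2) + fuel_chain (PySem.Int.floordiv m 3 - 2))).sum := by
  induction modules generalizing acc with
  | nil => simp
  | cons m ms ih =>
      rw [List.foldl_cons, ih]
      simp only [List.map_cons, List.sum_cons, calcLoop_eq, calc_result]
      ring

-- ===== VERDICT (by name: the statement is the Claim_ definition above) =====
theorem calculate_spec : Claim_equal_calculate := by
  intro modules _
  unfold Spec_calculate calculate calculate_alt
  rw [calculate_foldl]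
  ring
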